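-- pv_equiv track=rewrite | github.com/bingle625/E1I2-Algorithm | 문제풀이/김경린/sopt-algorithm/week8/221123_12987.py | solution
-- ===== SOURCE A (Python) =====
-- from collections import deque
--
-- def solution(A, B):
--     cnt = 0
--     A.sort()
--     B.sort()
--     B = deque(B)
--     for a in A:
--         if len(B):
--             while len(B) and a >= B[0]:
--                 B.popleft()
--             if len(B):
--                 B.popleft()
--                 cnt += 1
--         else:
--             break
--
--     return cnt
-- ===== SOURCE B (Python) =====
-- def solution(A, B):
--     # Balance-sweep: merge the two sorted lists ascending (B before an equal A),
--     # keeping a pool of passed A-elements; each B value consumes one pooled A if any.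
--     # Like the original, this sorts A and B in place; equivalence is about the return value.
--     A.sort()
--     B.sort()
--     i = j = pool = cnt = 0
--     n, m = len(A), len(B)
--     while j < m:
--         if i < n and A[i] < B[j]:
--             pool += 1
--             i += 1
--         else:
--             if pool > 0:
--                 cnt += 1
--                 pool -= 1
--             j += 1
--     return cnt
-- ===== Notes on version B (the rewrite author's own statement) =====
-- stated objective: alternative
-- what changed: Replaced the per-A-element deque greedy (inner popleft loop discarding B values <= a, then matching one) by a single balance-sweep that merges the two sorted lists ascending (B before an equal A) with an integer pool of passed A elements, matching a B whenever the pool is nonempty; both sort A and B in place.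
import Mathlib
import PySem

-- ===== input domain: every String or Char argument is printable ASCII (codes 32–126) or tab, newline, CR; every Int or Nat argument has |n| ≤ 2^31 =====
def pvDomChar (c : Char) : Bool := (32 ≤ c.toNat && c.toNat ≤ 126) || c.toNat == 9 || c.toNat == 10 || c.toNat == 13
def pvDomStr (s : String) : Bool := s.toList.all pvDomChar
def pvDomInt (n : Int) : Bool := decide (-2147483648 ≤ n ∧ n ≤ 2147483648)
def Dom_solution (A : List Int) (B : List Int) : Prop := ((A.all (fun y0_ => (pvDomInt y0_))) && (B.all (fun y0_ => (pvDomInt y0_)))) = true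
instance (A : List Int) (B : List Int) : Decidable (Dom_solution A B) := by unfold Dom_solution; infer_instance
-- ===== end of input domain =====

-- B replaces A's per-element deque greedy by one balance-sweep over the merged sorted lists
-- (objective: alternative decomposition, same cost). Both Pythons sort A and B in place;
-- the equivalence proved here is about the RETURN value only.

-- ===== PORT A =====
-- the inner `while len(B) and a >= B[0]: B.popleft()` loop
def popLe (a : Int) : List Int → List Int
  | [] => []
  | b :: bs => if a ≥ b then popLe a bs else b :: bs

-- the `for a in A` loop over the deque B, with `break` returning cnt
def aloop (cnt : Int) : List Int → List Int → Int
  | [], _ => cnt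
  | _ :: _, [] => cnt                 -- `else: break`
  | a :: as_, b :: bs =>
      match popLe a (b :: bs) with
      | [] => aloop cnt as_ []        -- inner while emptied B; next iteration breaks
      | _ :: bs' => aloop (cnt + 1) as_ bs'

def solution (A : List Int) (B : List Int) : Int :=
  aloop 0 (PySem.List.sorted A (fun x => x) false) (PySem.List.sorted B (fun x => x) false)

-- ===== PORT B =====
-- Source B's while loop over indices i, j with pool and cnt, as recursion on the two lists
def sweep (pool cnt : Int) : List Int → List Int → Int
  | _, [] => cnt
  | [], _ :: bs => if pool > 0 then sweep (pool - 1) (cnt + 1) [] bs else sweep pool cnt [] bs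
  | a :: as_, b :: bs =>
      if a < b then sweep (pool + 1) cnt as_ (b :: bs)
      else if pool > 0 then sweep (pool - 1) (cnt + 1) (a :: as_) bs
      else sweep pool cnt (a :: as_) bs
termination_by as_ bs => as_.length + bs.length

def solution_alt (A : List Int) (B : List Int) : Int :=
  sweep 0 0 (PySem.List.sorted A (fun x => x) false) (PySem.List.sorted B (fun x => x) false)

-- ===== PRECONDITION & SPEC =====
def Spec_solution (A : List Int) (B : List Int) (out : Int) : Prop := out = solution_alt A B
instance (A : List Int) (B : List Int) (out : Int) : Decidable (Spec_solution A B out) := by unfold Spec_solution; infer_instance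

-- ===== CLAIM (what is proved, stated in full; the proofs are below) =====
def Claim_equal_solution : Prop := ∀ (A : List Int) (B : List Int), Dom_solution A B → Spec_solution A B (solution A B)

-- ===== LEMMAS AND PROOFS =====

theorem sweep_nil_right (pool cnt : Int) (as_ : List Int) : sweep pool cnt as_ [] = cnt := by
  cases as_ <;> simp [sweep]

theorem sweep_acc (pool cnt : Int) (as_ bs : List Int) :
    sweep pool cnt as_ bs = cnt + sweep pool 0 as_ bs := by
  induction bs generalizing pool cnt as_ with
  | nil => simp [sweep_nil_right]
  | cons b bs ih =>
    induction as_ generalizing pool cnt with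
    | nil =>
      by_cases hp : pool > 0
      · simp only [sweep, hp, reduceIte]
        rw [ih (pool - 1) (cnt + 1), ih (pool - 1) (0 + 1)]; ring
      · simp only [sweep, hp, reduceIte]
        rw [ih pool cnt, ih pool 0]
    | cons a as_ iha =>
      by_cases hab : a < b
      · simp only [sweep, hab, reduceIte]
        rw [iha (pool + 1) cnt]
      · by_cases hp : pool > 0
        · simp only [sweep, hab, hp, reduceIte]
          rw [ih (pool - 1) (cnt + 1), ih (pool - 1) (0 + 1)]; ring
        · simp only [sweep, hab, hp, reduceIte]
          rw [ih pool cnt, ih pool 0]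

-- key exchange lemma: a pooled element (smaller than every remaining B value) matches b
theorem sweep_pool_succ (p : Int) (hp : 0 ≤ p) (as_ bs : List Int) (b : Int)
    (hb : ∀ x ∈ bs, b ≤ x) :
    sweep (p + 1) 0 as_ (b :: bs) = 1 + sweep p 0 as_ bs := by
  induction as_ generalizing p with
  | nil =>
    have h1 : p + 1 > 0 := by omega
    simp only [sweep, h1, reduceIte]
    rw [sweep_acc]
    have hpp : p + 1 - 1 = p := by ring
    rw [hpp]; ring
  | cons a as_ ih =>
    by_cases hab : a < b
    · simp only [sweep, hab, reduceIte]
      rw [ih (p + 1) (by omega)]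
      cases bs with
      | nil => simp [sweep_nil_right]
      | cons b' bs' =>
        have hab' : a < b' := lt_of_lt_of_le hab (hb b' (by simp))
        simp only [sweep, hab', reduceIte]
    · have h1 : p + 1 > 0 := by omega
      simp only [sweep, hab, h1, reduceIte]
      rw [sweep_acc]
      have hpp : p + 1 - 1 = p := by ring
      rw [hpp]; ring

theorem sweep_zero_nil (cnt : Int) (bs : List Int) : sweep 0 cnt [] bs = cnt := by
  induction bs generalizing cnt with
  | nil => simp [sweep]
  | cons b bs ih => simp only [sweep]; exact ih cnt

theorem aloop_nil_right (cnt : Int) (as_ : List Int) : aloop cnt as_ [] = cnt := by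
  cases as_ <;> simp [aloop]

-- dropping a B value that the current a already exceeds
theorem aloop_drop (cnt a : Int) (as_ bs : List Int) (b : Int) (h : a ≥ b) :
    aloop cnt (a :: as_) (b :: bs) = aloop cnt (a :: as_) bs := by
  cases bs with
  | nil => simp [aloop, popLe, h, aloop_nil_right]
  | cons b' bs' => simp [aloop, popLe, h]

theorem main_lemma (as_ bs : List Int) (cnt : Int)
    (hb : bs.Pairwise (· ≤ ·)) :
    aloop cnt as_ bs = cnt + sweep 0 0 as_ bs := by
  induction bs generalizing as_ cnt with
  | nil => simp [aloop_nil_right, sweep_nil_right]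
  | cons b bs ih =>
    rw [List.pairwise_cons] at hb
    cases as_ with
    | nil => simp [aloop, sweep_zero_nil]
    | cons a as_ =>
      by_cases hab : a < b
      · have hnge : ¬ a ≥ b := by omega
        simp only [aloop, popLe, hnge, reduceIte]
        rw [ih as_ (cnt + 1) hb.2]
        simp only [sweep, hab, reduceIte]
        rw [sweep_pool_succ 0 le_rfl as_ bs b hb.1]
        ring
      · have hge : a ≥ b := by omega
        rw [aloop_drop cnt a as_ bs b hge, ih (a :: as_) cnt hb.2]
        have hp0 : ¬ (0 : Int) > 0 := by omega
        simp only [sweep, hab, hp0, reduceIte]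

-- ===== VERDICT (by name: the statement is the Claim_ definition above) =====
theorem solution_spec : Claim_equal_solution := by
  intro A B _
  unfold Spec_solution solution solution_alt
  rw [main_lemma _ _ _ (by simpa using PySem.List.sorted_pairwise B (fun x => x) )]
  ring
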